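-- pv_equiv track=rewrite | github.com/Aluriak/human | poc.py | simplify_concept
-- ===== SOURCE A (Python) =====
-- def simplify_concept(concept:(set, set), covered_edges:set) -> (set, set):
--     extent, intent = concept
--     extent_edges = {
--         obj: {(obj, attr) for attr in intent} - covered_edges
--         for obj in extent
--     }
--     intent_edges = {
--         attr: {(obj, attr) for obj in extent} - covered_edges
--         for attr in intent
--     }
--     simplified_extent = {obj for obj, remaining_edges in extent_edges.items() if remaining_edges}
--     simplified_intent = {att for att, remaining_edges in intent_edges.items() if remaining_edges}
--     return simplified_extent, simplified_intent
-- ===== SOURCE B (Python) =====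
-- def simplify_concept(concept, covered_edges):
--     # One pass over covered_edges counting covered incident edges per object/attribute;
--     # an object keeps an uncovered edge iff its covered count is below len(intent).
--     extent, intent = concept
--     n_ext, n_int = len(extent), len(intent)
--     cov_obj = {}
--     cov_att = {}
--     for obj, attr in covered_edges:
--         if attr in intent:
--             cov_obj[obj] = cov_obj.get(obj, 0) + 1
--         if obj in extent:
--             cov_att[attr] = cov_att.get(attr, 0) + 1
--     return ({obj for obj in extent if cov_obj.get(obj, 0) < n_int},
--             {attr for attr in intent if cov_att.get(attr, 0) < n_ext})
-- ===== Notes on version B (the rewrite author's own statement) =====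
-- stated objective: faster
-- what changed: Instead of materialising, per object and per attribute, the set of its incident edges and subtracting covered_edges, B makes one pass over covered_edges counting covered incident edges per object/attribute and keeps an element iff its count is below the other dimension's size.
import Mathlib
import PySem

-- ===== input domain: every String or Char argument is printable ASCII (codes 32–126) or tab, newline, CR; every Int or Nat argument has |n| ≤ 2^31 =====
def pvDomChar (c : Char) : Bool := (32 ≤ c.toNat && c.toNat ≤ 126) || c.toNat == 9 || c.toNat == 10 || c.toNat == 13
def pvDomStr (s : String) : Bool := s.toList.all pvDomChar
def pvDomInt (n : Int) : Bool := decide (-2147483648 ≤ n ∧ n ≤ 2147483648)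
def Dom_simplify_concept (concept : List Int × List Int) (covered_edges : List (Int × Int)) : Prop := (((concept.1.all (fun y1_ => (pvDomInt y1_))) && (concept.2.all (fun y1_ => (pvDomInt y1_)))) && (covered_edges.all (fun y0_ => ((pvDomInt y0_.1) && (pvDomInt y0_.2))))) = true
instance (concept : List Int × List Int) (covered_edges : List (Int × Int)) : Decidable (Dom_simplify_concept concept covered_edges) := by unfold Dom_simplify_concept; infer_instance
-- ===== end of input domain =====

-- B replaces A's per-object/per-attribute set differences by one counting pass over covered_edges (faster).
-- Set-typed arguments/results follow the convention: a Python set is its list of distinct elements (PySem.Set).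

-- ===== PORT A =====
def simplify_concept (concept : List Int × List Int) (covered_edges : List (Int × Int)) : List Int × List Int :=
  let extent : PySem.Set Int := PySem.Set.ofList concept.1
  let intent : PySem.Set Int := PySem.Set.ofList concept.2
  let extent_edges : PySem.Dict Int (PySem.Set (Int × Int)) :=
    extent.foldl (fun d obj =>
      d.insert obj (PySem.Set.diff (PySem.Set.ofList (intent.map (fun attr => (obj, attr)))) covered_edges))
      PySem.Dict.empty
  let intent_edges : PySem.Dict Int (PySem.Set (Int × Int)) :=
    intent.foldl (fun d attr =>
      d.insert attr (PySem.Set.diff (PySem.Set.ofList (extent.map (fun obj => (obj, attr)))) covered_edges))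
      PySem.Dict.empty
  let simplified_extent : PySem.Set Int :=
    PySem.Set.ofList ((extent_edges.items.filter (fun p => !p.2.isEmpty)).map (fun p => p.1))
  let simplified_intent : PySem.Set Int :=
    PySem.Set.ofList ((intent_edges.items.filter (fun p => !p.2.isEmpty)).map (fun p => p.1))
  (simplified_extent, simplified_intent)

-- ===== PORT B =====
def simplify_concept_alt (concept : List Int × List Int) (covered_edges : List (Int × Int)) : List Int × List Int :=
  let extent : PySem.Set Int := PySem.Set.ofList concept.1
  let intent : PySem.Set Int := PySem.Set.ofList concept.2
  let nExt : Int := (extent.length : Int)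
  let nInt : Int := (intent.length : Int)
  let counters : PySem.Dict Int Int × PySem.Dict Int Int :=
    (PySem.Set.ofList covered_edges).foldl
      (fun p e =>
        (if PySem.Set.contains intent e.2 then p.1.modify e.1 0 (· + 1) else p.1,
         if PySem.Set.contains extent e.1 then p.2.modify e.2 0 (· + 1) else p.2))
      (PySem.Dict.empty, PySem.Dict.empty)
  (extent.filter (fun obj => decide (counters.1.getD obj 0 < nInt)),
   intent.filter (fun attr => decide (counters.2.getD attr 0 < nExt)))

-- ===== PRECONDITION & SPEC =====
def Spec_simplify_concept (concept : List Int × List Int) (covered_edges : List (Int × Int)) (out : List Int × List Int) : Prop := out = simplify_concept_alt concept covered_edges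
instance (concept : List Int × List Int) (covered_edges : List (Int × Int)) (out : List Int × List Int) : Decidable (Spec_simplify_concept concept covered_edges out) := by unfold Spec_simplify_concept; infer_instance

-- ===== CLAIM (what is proved, stated in full; the proofs are below) =====
def Claim_equal_simplify_concept : Prop := ∀ (concept : List Int × List Int) (covered_edges : List (Int × Int)), Dom_simplify_concept concept covered_edges → Spec_simplify_concept concept covered_edges (simplify_concept concept covered_edges)

-- ===== LEMMAS AND PROOFS =====

-- In A's dict-building loop every stored value is determined by its key.
theorem pv_items_val {V : Type} (f : Int → V) (l : List Int) :
    ∀ (d : PySem.Dict Int V), (∀ p ∈ d.items, p.2 = f p.1) →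
      ∀ p ∈ (l.foldl (fun d x => d.insert x (f x)) d).items, p.2 = f p.1 := by
  induction l with
  | nil => intro d hd; simpa using hd
  | cons x xs ih =>
      intro d hd
      simp only [List.foldl_cons]
      refine ih _ ?_
      intro p hp
      rcases (PySem.Dict.mem_items_insert _ _ _ _).1 hp with h | h
      · simp [h]
      · exact hd p h.1

-- filtering items on a key-determined value then projecting keys = filtering the keys
theorem pv_filter_map_fst {V : Type} (f : Int → V) (g : V → Bool) :
    ∀ (l : List (Int × V)), (∀ p ∈ l, p.2 = f p.1) →
      (l.filter (fun p => g p.2)).map (fun p => p.1)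
        = (l.map (fun p => p.1)).filter (fun k => g (f k)) := by
  intro l
  induction l with
  | nil => intro _; simp
  | cons p ps ih =>
      intro h
      have hp : p.2 = f p.1 := h p (by simp)
      have hps := ih (fun q hq => h q (by simp [hq]))
      by_cases hg : g (f p.1) = true
      · simp [hp, hg, hps]
      · simp [hp, Bool.of_not_eq_true hg, hps]

-- getD of a guarded counting loop
theorem pv_getD_count (q : Int × Int → Bool) (k : Int × Int → Int) (v : Int) :
    ∀ (l : List (Int × Int)) (d : PySem.Dict Int Int),
      (l.foldl (fun d e => if q e then d.modify (k e) 0 (· + 1) else d) d).getD v 0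
        = d.getD v 0 + ((l.filter q).map k).count v := by
  intro l
  induction l with
  | nil => intro d; simp
  | cons e es ih =>
      intro d
      by_cases hq : q e = true
      · rw [List.foldl_cons, if_pos hq, ih, PySem.Dict.getD_modify]
        by_cases hv : v = k e
        · simp [hv, hq]; ring
        · simp [hv, hq, Ne.symm hv]
      · rw [List.foldl_cons, if_neg hq, ih]
        simp [hq]

-- bijection between counted covered edges and counted attributes
theorem pv_countP_swap (edges : List (Int × Int)) (attrs : List Int) (mk : Int → Int × Int)
    (hinj : Function.Injective mk) (he : edges.Nodup) (ha : attrs.Nodup) :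
    edges.countP (fun e => decide (∃ a ∈ attrs, e = mk a))
      = attrs.countP (fun a => decide (mk a ∈ edges)) := by
  classical
  rw [List.countP_eq_length_filter, List.countP_eq_length_filter]
  have hperm : (edges.filter (fun e => decide (∃ a ∈ attrs, e = mk a))).Perm
      ((attrs.filter (fun a => decide (mk a ∈ edges))).map mk) := by
    rw [List.perm_ext_iff_of_nodup (he.filter _) ((ha.filter _).map hinj)]
    intro x
    simp only [List.mem_filter, List.mem_map, decide_eq_true_eq]
    constructor
    · rintro ⟨hx, a, haa, rfl⟩
      exact ⟨a, ⟨haa, hx⟩, rfl⟩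
    · rintro ⟨a, ⟨haa, hx⟩, rfl⟩
      exact ⟨hx, a, haa, rfl⟩
  rw [hperm.length_eq, List.length_map]

-- countP < length iff some element fails the predicate
theorem pv_countP_lt_length (l : List Int) (p : Int → Bool) :
    l.countP p < l.length ↔ ∃ a ∈ l, ¬ p a = true := by
  have hle := List.countP_le_length (p := p) (l := l)
  constructor
  · intro hlt
    by_contra hno
    push Not at hno
    have : l.countP p = l.length := List.countP_eq_length.2 (fun a ha => hno a ha)
    omega
  · intro ⟨a, ha, hpa⟩ 
    have : l.countP p ≠ l.length := by
      intro h
      exact hpa (List.countP_eq_length.1 h a ha)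
    omega

-- the per-element equivalence: "some incident edge uncovered" = "covered incident count < dimension"
theorem pv_key (others : List Int) (ce0 : List (Int × Int)) (mk : Int → Int × Int)
    (hinj : Function.Injective mk) (hoth : others.Nodup)
    (q : Int × Int → Bool) (kf : Int × Int → Int) (v : Int)
    (hq : ∀ e, ((kf e == v) && q e) = decide (∃ a ∈ others, e = mk a)) :
    (!(PySem.Set.diff (PySem.Set.ofList (others.map mk)) ce0).isEmpty)
      = decide (((((PySem.Set.ofList ce0).filter q).map kf).count v : Int) < (others.length : Int)) := by
  classical
  have hcnt : (((PySem.Set.ofList ce0).filter q).map kf).count v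
      = others.countP (fun a => decide (mk a ∈ PySem.Set.ofList ce0)) := by
    rw [List.count_eq_countP, List.countP_map, List.countP_filter]
    rw [List.countP_congr (q := fun e => decide (∃ a ∈ others, e = mk a)) (fun e _ => by
      simpa using iff_of_eq (congrArg (· = true) (hq e)))]
    exact pv_countP_swap _ _ mk hinj (PySem.Set.nodup_ofList ce0) hoth
  rw [hcnt, Bool.eq_iff_iff]
  simp only [Bool.not_eq_true', List.isEmpty_eq_false_iff, decide_eq_true_eq, Nat.cast_lt]
  rw [pv_countP_lt_length, Ne, List.eq_nil_iff_forall_not_mem]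
  push Not
  constructor
  · rintro ⟨x, hx⟩
    rw [PySem.Set.mem_diff] at hx
    obtain ⟨hx1, hx2⟩ := hx
    rw [PySem.Set.mem_ofList, List.mem_map] at hx1
    obtain ⟨a, ha, rfl⟩ := hx1
    exact ⟨a, ha, by simp [PySem.Set.mem_ofList, hx2]⟩
  · rintro ⟨a, ha, hna⟩
    refine ⟨mk a, ?_⟩
    rw [PySem.Set.mem_diff, PySem.Set.mem_ofList]
    exact ⟨List.mem_map.2 ⟨a, ha, rfl⟩, by simpa [PySem.Set.mem_ofList] using hna⟩

-- ===== VERDICT (by name: the statement is the Claim_ definition above) =====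
theorem simplify_concept_spec : Claim_equal_simplify_concept := by
  intro concept covered_edges _
  unfold Spec_simplify_concept
  simp only [simplify_concept, simplify_concept_alt]
  rw [PySem.List.foldl_prod_mk
    (f := fun d (e : Int × Int) => if PySem.Set.contains (PySem.Set.ofList concept.2) e.2 then PySem.Dict.modify d e.1 0 (· + 1) else d)
    (g := fun d (e : Int × Int) => if PySem.Set.contains (PySem.Set.ofList concept.1) e.1 then PySem.Dict.modify d e.2 0 (· + 1) else d)]
  simp only [Prod.mk.injEq]
  refine ⟨?_, ?_⟩
  · -- extent component
    rw [pv_filter_map_fst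
        (fun obj => PySem.Set.diff (PySem.Set.ofList ((PySem.Set.ofList concept.2).map (fun attr => (obj, attr)))) covered_edges)
        (fun s => !s.isEmpty) _
        (pv_items_val _ _ PySem.Dict.empty (by intro p hp; simp [PySem.Dict.empty] at hp))]
    have hkeys : (((PySem.Set.ofList concept.1).foldl
        (fun d obj => PySem.Dict.insert d obj
          (PySem.Set.diff (PySem.Set.ofList ((PySem.Set.ofList concept.2).map (fun attr => (obj, attr)))) covered_edges))
        PySem.Dict.empty).items.map (fun p => p.1)) = PySem.Set.ofList concept.1 := by
      have h := PySem.Dict.keys_foldl_insert (l := PySem.Set.ofList concept.1)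
        (f := fun d obj => PySem.Set.diff (PySem.Set.ofList ((PySem.Set.ofList concept.2).map (fun attr => (obj, attr)))) covered_edges)
        (d := PySem.Dict.empty)
      simpa [PySem.Dict.keys, PySem.Dict.empty, PySem.Set.update_nil_left, PySem.Set.ofList_ofList] using h
    rw [hkeys, PySem.Set.ofList_eq_self_of_nodup _ (List.Nodup.filter _ (PySem.Set.nodup_ofList _))]
    refine List.filter_congr ?_
    intro k hk
    rw [pv_getD_count (fun e => PySem.Set.contains (PySem.Set.ofList concept.2) e.2) Prod.fst k]
    rw [PySem.Dict.getD_empty, zero_add]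
    refine pv_key (PySem.Set.ofList concept.2) covered_edges (fun a => (k, a))
      (fun x y h => by simpa using congrArg Prod.snd h) (PySem.Set.nodup_ofList _) _ _ _ ?_
    rintro ⟨o, a⟩
    rw [Bool.eq_iff_iff]
    simp only [Bool.and_eq_true, beq_iff_eq, decide_eq_true_eq, PySem.Set.contains_iff]
    constructor
    · rintro ⟨rfl, ha⟩; exact ⟨a, ha, rfl⟩
    · rintro ⟨b, hb, heq⟩
      obtain ⟨h1, h2⟩ := Prod.mk.injEq .. ▸ heq
      exact ⟨h1, h2 ▸ hb⟩
  · -- intent component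
    rw [pv_filter_map_fst
        (fun attr => PySem.Set.diff (PySem.Set.ofList ((PySem.Set.ofList concept.1).map (fun obj => (obj, attr)))) covered_edges)
        (fun s => !s.isEmpty) _
        (pv_items_val _ _ PySem.Dict.empty (by intro p hp; simp [PySem.Dict.empty] at hp))]
    have hkeys : (((PySem.Set.ofList concept.2).foldl
        (fun d attr => PySem.Dict.insert d attr
          (PySem.Set.diff (PySem.Set.ofList ((PySem.Set.ofList concept.1).map (fun obj => (obj, attr)))) covered_edges))
        PySem.Dict.empty).items.map (fun p => p.1)) = PySem.Set.ofList concept.2 := by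
      have h := PySem.Dict.keys_foldl_insert (l := PySem.Set.ofList concept.2)
        (f := fun d attr => PySem.Set.diff (PySem.Set.ofList ((PySem.Set.ofList concept.1).map (fun obj => (obj, attr)))) covered_edges)
        (d := PySem.Dict.empty)
      simpa [PySem.Dict.keys, PySem.Dict.empty, PySem.Set.update_nil_left, PySem.Set.ofList_ofList] using h
    rw [hkeys, PySem.Set.ofList_eq_self_of_nodup _ (List.Nodup.filter _ (PySem.Set.nodup_ofList _))]
    refine List.filter_congr ?_
    intro k hk
    rw [pv_getD_count (fun e => PySem.Set.contains (PySem.Set.ofList concept.1) e.1) Prod.snd k]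
    rw [PySem.Dict.getD_empty, zero_add]
    refine pv_key (PySem.Set.ofList concept.1) covered_edges (fun o => (o, k))
      (fun x y h => by simpa using congrArg Prod.fst h) (PySem.Set.nodup_ofList _) _ _ _ ?_
    rintro ⟨o, a⟩
    rw [Bool.eq_iff_iff]
    simp only [Bool.and_eq_true, beq_iff_eq, decide_eq_true_eq, PySem.Set.contains_iff]
    constructor
    · rintro ⟨rfl, ho⟩; exact ⟨o, ho, rfl⟩
    · rintro ⟨b, hb, heq⟩
      obtain ⟨h1, h2⟩ := Prod.mk.injEq .. ▸ heq
      exact ⟨h2, h1 ▸ hb⟩
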